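-- pv_equiv track=rewrite | github.com/lntegrals/bash-terminal-tutor | app.py | is_command_allowed
-- ===== SOURCE A (Python) =====
-- ALLOWED_COMMANDS = {
--     'ls': ['ls', 'ls -la', 'ls -l', 'ls -a'],
--     'cd': ['cd'],
--     'pwd': ['pwd'],
--     'mkdir': ['mkdir'],
--     'touch': ['touch'],
--     'rm': ['rm', 'rm -r', 'rm -f'],
--     'cp': ['cp'],
--     'mv': ['mv'],
--     'cat': ['cat'],
--     'head': ['head'],
--     'tail': ['tail'],
--     'grep': ['grep'],
--     'find': ['find'],
--     'chmod': ['chmod'],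
--     'echo': ['echo'],
--     'whoami': ['whoami'],
--     'date': ['date'],
--     'cal': ['cal'],
--     'clear': ['clear'],
--     'help': ['help'],
--     'man': ['man'],
-- }
--
-- def is_command_allowed(cmd):
--     """Check if command is in whitelist"""
--     cmd = cmd.strip()
--     # Allow help command for any topic
--     if cmd.startswith('help'):
--         return True
--     # Check if command starts with allowed base
--     for base in ALLOWED_COMMANDS:
--         if cmd.startswith(base + ' ') or cmd == base:
--             return True
--     return False
-- ===== SOURCE B (Python) =====
-- ALLOWED_COMMANDS = {
--     'ls': ['ls', 'ls -la', 'ls -l', 'ls -a'],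
--     'cd': ['cd'],
--     'pwd': ['pwd'],
--     'mkdir': ['mkdir'],
--     'touch': ['touch'],
--     'rm': ['rm', 'rm -r', 'rm -f'],
--     'cp': ['cp'],
--     'mv': ['mv'],
--     'cat': ['cat'],
--     'head': ['head'],
--     'tail': ['tail'],
--     'grep': ['grep'],
--     'find': ['find'],
--     'chmod': ['chmod'],
--     'echo': ['echo'],
--     'whoami': ['whoami'],
--     'date': ['date'],
--     'cal': ['cal'],
--     'clear': ['clear'],
--     'help': ['help'],
--     'man': ['man'],
-- }
--
-- # Prefix trie of the whitelist keys, built once: nested dicts keyed by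
-- # characters; the marker key '' flags that a whole key ends at this node.
-- _TRIE = {}
-- for _key in ALLOWED_COMMANDS:
--     _node = _TRIE
--     for _ch in _key:
--         _node = _node.setdefault(_ch, {})
--     _node[''] = True
--
--
-- def is_command_allowed(cmd):
--     """Check if command is in whitelist"""
--     cmd = cmd.strip()
--     # Allow help command for any topic
--     if cmd.startswith('help'):
--         return True
--     # Walk the trie over the command's leading word (up to the first space)
--     node = _TRIE
--     for ch in cmd:
--         if ch == ' ':
--             break
--         if ch not in node:
--             return False
--         node = node[ch]
--     return '' in node
-- ===== Notes on version B (the rewrite author's own statement) =====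
-- stated objective: alternative
-- what changed: Replaces A's linear scan over all whitelist keys with per-key prefix tests by a prefix trie (nested dicts) built once from the keys, which B walks character by character over the command's leading word up to the first space, accepting on a terminal marker.
import Mathlib
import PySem

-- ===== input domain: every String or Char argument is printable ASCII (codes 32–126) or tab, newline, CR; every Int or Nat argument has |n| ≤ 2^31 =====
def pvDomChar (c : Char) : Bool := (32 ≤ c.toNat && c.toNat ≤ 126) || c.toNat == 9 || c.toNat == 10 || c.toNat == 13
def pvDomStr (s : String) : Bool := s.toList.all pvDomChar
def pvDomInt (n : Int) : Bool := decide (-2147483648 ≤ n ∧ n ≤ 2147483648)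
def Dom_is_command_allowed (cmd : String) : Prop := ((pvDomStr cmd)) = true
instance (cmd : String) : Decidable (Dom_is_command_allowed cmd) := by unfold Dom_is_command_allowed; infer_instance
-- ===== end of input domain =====

-- B replaces A's per-key prefix scan with a prefix trie of the whitelist keys, walked once over the command's leading word (alternative algorithm; same behaviour).


-- keys of ALLOWED_COMMANDS, in insertion order (only the keys matter to this function)
def allowedKeys : List String :=
  ["ls", "cd", "pwd", "mkdir", "touch", "rm", "cp", "mv", "cat", "head", "tail",
   "grep", "find", "chmod", "echo", "whoami", "date", "cal", "clear", "help", "man"]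

-- ===== PORT A =====
def is_command_allowed (cmd : String) : Bool :=
  let c := PySem.Str.strip cmd
  if PySem.Str.startswith c "help" then true
  else
    -- for base in ALLOWED_COMMANDS: if cmd.startswith(base + ' ') or cmd == base: return True
    allowedKeys.any (fun base => PySem.Str.startswith c (base ++ " ") || c == base)

-- ===== PORT B =====
-- Source B's trie is a nested dict (char → child) with a '' marker for "a key ends here";
-- here: a terminal flag plus an ordered child list (mutual pair, no nested inductive).
mutual
inductive PTrie : Type
  | mk : Bool → PChildren → PTrie
inductive PChildren : Type
  | nil : PChildren
  | cons : Char → PTrie → PChildren → PChildren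
end

def PTrie.term : PTrie → Bool
  | .mk b _ => b

def PTrie.children : PTrie → PChildren
  | .mk _ c => c

def PTrie.empty : PTrie := .mk false .nil

-- children lookup (Python: `ch in node` / `node[ch]`, first match)
def childGet? : PChildren → Char → Option PTrie
  | .nil, _ => none
  | .cons c t rest, x => if x == c then some t else childGet? rest x

-- children update (Python: node.setdefault / assignment; overwrite in place, else append)
def childSet : PChildren → Char → PTrie → PChildren
  | .nil, x, t => .cons x t .nil
  | .cons c t0 rest, x, t => if x == c then .cons c t rest else .cons c t0 (childSet rest x t)

-- one iteration of Source B's build loop: thread key's chars through setdefault, mark terminal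
def trieInsert : PTrie → List Char → PTrie
  | t, [] => .mk true t.children
  | t, c :: r =>
    .mk t.term (childSet t.children c (trieInsert ((childGet? t.children c).getD PTrie.empty) r))

-- _TRIE: the build loop over the whitelist keys
def buildTrie : PTrie := allowedKeys.foldl (fun t k => trieInsert t k.toList) PTrie.empty

-- the `for ch in cmd` walk: break on space, fail on missing child, accept on terminal marker
def trieWalk : PTrie → List Char → Bool
  | t, [] => t.term
  | t, c :: r =>
    if c == ' ' then t.term
    else
      match childGet? t.children c with
      | none => false
      | some ch => trieWalk ch r

def is_command_allowed_alt (cmd : String) : Bool :=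
  let c := PySem.Str.strip cmd
  if PySem.Str.startswith c "help" then true
  else trieWalk buildTrie c.toList

-- ===== PRECONDITION & SPEC =====
def Spec_is_command_allowed (cmd : String) (out : Bool) : Prop := out = is_command_allowed_alt cmd
instance (cmd : String) (out : Bool) : Decidable (Spec_is_command_allowed cmd out) := by unfold Spec_is_command_allowed; infer_instance

-- ===== CLAIM (what is proved, stated in full; the proofs are below) =====
def Claim_equal_is_command_allowed : Prop := ∀ (cmd : String), Dom_is_command_allowed cmd → Spec_is_command_allowed cmd (is_command_allowed cmd)

-- ===== LEMMAS AND PROOFS =====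

-- exact-key membership in a trie (proof-only characterisation of the walk)
def trieContains : PTrie → List Char → Bool
  | t, [] => t.term
  | t, c :: r =>
    match childGet? t.children c with
    | none => false
    | some ch => trieContains ch r

theorem walk_eq_contains : ∀ (s : List Char) (t : PTrie),
    trieWalk t s = trieContains t (s.takeWhile (· ≠ ' ')) := by
  intro s
  induction s with
  | nil => intro t; rfl
  | cons c r ih =>
    intro t
    by_cases hc : c = ' '
    · subst hc; simp [trieWalk, List.takeWhile, trieContains]
    · cases hg : childGet? t.children c with
      | none => simp [trieWalk, hc, List.takeWhile, trieContains, hg]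
      | some ch => simp [trieWalk, hc, List.takeWhile, trieContains, hg, ih]

theorem contains_empty : ∀ (s : List Char), trieContains PTrie.empty s = false := by
  intro s; cases s <;> rfl

theorem get?_set : ∀ (l : PChildren) (c : Char) (t : PTrie) (c' : Char),
    childGet? (childSet l c t) c' = if c' = c then some t else childGet? l c'
  | .nil, c, t, c' => by
      by_cases h : c' = c <;> simp [childSet, childGet?, h]
  | .cons c0 t0 rest, c, t, c' => by
      have ihr := get?_set rest c t c'
      by_cases h0 : c = c0
      · subst h0
        by_cases h : c' = c <;> simp [childSet, childGet?, h]
      · by_cases h : c' = c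
        · subst h
          simp [childSet, childGet?, h0, ihr]
        · by_cases h1 : c' = c0
          · simp [childSet, childGet?, h0, h1]
            exact fun hh => absurd hh.symm h0
          · simp [childSet, childGet?, h0, h1, ihr, h]

theorem contains_insert : ∀ (k : List Char) (t : PTrie) (s : List Char),
    trieContains (trieInsert t k) s = ((s == k) || trieContains t s) := by
  intro k
  induction k with
  | nil =>
    intro t s
    cases s with
    | nil => simp [trieInsert, trieContains, PTrie.term]
    | cons c r => simp [trieInsert, trieContains, PTrie.children]
  | cons c kr ih =>
    intro t s
    obtain ⟨tb, tc⟩ := t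
    cases s with
    | nil => simp [trieInsert, trieContains, PTrie.term, PTrie.children]
    | cons c' s' =>
      simp only [trieInsert, trieContains, PTrie.children, PTrie.term, get?_set]
      by_cases h : c' = c
      · subst h
        rw [if_pos rfl]
        cases hg : childGet? tc c' with
        | none => simp [ih, contains_empty]
        | some ch => simp [ih]

      · rw [if_neg h]
        have hb : ((c' :: s' : List Char) == c :: kr) = false := by
          simp [List.cons_beq_cons, h]
        rw [hb, Bool.false_or]

theorem contains_fold : ∀ (ks : List String) (t : PTrie) (s : List Char),
    trieContains (ks.foldl (fun t k => trieInsert t k.toList) t) s =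
      (ks.any (fun k => s == k.toList) || trieContains t s) := by
  intro ks
  induction ks with
  | nil => intro t s; simp
  | cons k kr ih =>
    intro t s
    simp [List.foldl_cons, ih, contains_insert, Bool.or_comm, Bool.or_assoc]

-- per-key equivalence: A's prefix-with-space-or-equal test ⟺ first token equals the key, for space-free keys
theorem tok_lemma (b : List Char) (hb : ' ' ∉ b) : ∀ (s : List Char),
    (PySem.Chars.startswith s (b ++ [' ']) || s == b) = (s.takeWhile (· ≠ ' ') == b) := by
  induction b with
  | nil =>
    intro s
    cases s with
    | nil => decide
    | cons c t =>
      by_cases hc : c = ' '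
      · simp [PySem.Chars.startswith, List.isPrefixOf, List.takeWhile, hc]
      · simp [PySem.Chars.startswith, List.isPrefixOf, List.takeWhile, hc]
        exact fun h => hc h.symm
  | cons x b' ih =>
    intro s
    have hx : x ≠ ' ' := fun h => hb (h ▸ List.mem_cons_self)
    have hb' : ' ' ∉ b' := fun h => hb (List.mem_cons_of_mem _ h)
    cases s with
    | nil => simp [PySem.Chars.startswith]
    | cons c t =>
      by_cases hc : c = x
      · subst hc
        have := ih hb' t
        simpa [PySem.Chars.startswith, List.isPrefixOf, List.takeWhile, hx] using this
      · have hxc : (x == c) = false := by simp [Ne.symm hc]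
        have hcx : (c == x) = false := by simp [hc]
        by_cases hcs : c = ' '
        · subst hcs
          simp [PySem.Chars.startswith, List.takeWhile, List.isPrefixOf, hxc]
          exact fun h => absurd h.symm hx
        · simp [PySem.Chars.startswith, List.takeWhile, List.isPrefixOf, hxc, hcx, hcs]

theorem beq_toList (c b : String) : (c == b) = (c.toList == b.toList) := by
  rw [Bool.eq_iff_iff]; simp [String.ext_iff]

theorem any_congr_mem {α : Type} (l : List α) (f g : α → Bool)
    (h : ∀ a ∈ l, f a = g a) : l.any f = l.any g := by
  induction l with
  | nil => rfl
  | cons a t ih =>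
    simp only [List.any_cons, h a List.mem_cons_self,
      ih (fun x hx => h x (List.mem_cons_of_mem _ hx))]

-- one whitelist key: A's per-key test equals "first token == key"
theorem key_eq (b : String) (hsp : ' ' ∉ b.toList) (c : String) :
    (PySem.Str.startswith c (b ++ " ") || c == b) =
    (c.toList.takeWhile (· ≠ ' ') == b.toList) := by
  have h1 : (b ++ " ").toList = b.toList ++ [' '] := by simp
  rw [PySem.Str.startswith, h1, beq_toList, tok_lemma b.toList hsp c.toList]

-- ===== VERDICT (by name: the statement is the Claim_ definition above) =====
theorem is_command_allowed_spec : Claim_equal_is_command_allowed := by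
  intro cmd _
  show is_command_allowed cmd = is_command_allowed_alt cmd
  unfold is_command_allowed is_command_allowed_alt
  by_cases h : PySem.Str.startswith (PySem.Str.strip cmd) "help" = true
  · rw [if_pos h, if_pos h]
  · rw [if_neg h, if_neg h]
    rw [walk_eq_contains, buildTrie, contains_fold, contains_empty, Bool.or_false]
    refine any_congr_mem _ _ _ (fun b hbk => ?_)
    have hsp : ' ' ∉ b.toList := by fin_cases hbk <;> decide
    exact key_eq b hsp (PySem.Str.strip cmd)
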